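-- pv_equiv track=rewrite | github.com/sigilwig44/AdventOfCode23 | advent_day7_pt2.py | sort_hands
-- ===== SOURCE A (Python) =====
-- import collections
-- import itertools
--
-- def card_rank(hand):
--  """Returns the rank of a card from highest to lowest: A, K, Q, J, T, ..."""
--  ranks = []
--  for card in hand:
--    ranks.append("J23456789TQKA".find(card))
--  return ranks
--
-- def sort_hands(hands):
--
--   def hand_rank(hand):
--     cards, _ = hand  # Extract cards and discard the secondary value
--
--     # Find optimal hand_type by considering all possible wild card replacements
--     best_hand_type = 0
--     if cards.count("J") > 0:
--       for replacements in itertools.product("23456789TQKA", repeat=cards.count("J")):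
--         replaced_cards = replace_cards(cards, replacements)
--         hand_type = determine_hand_type(replaced_cards)
--         best_hand_type = max(best_hand_type, hand_type)
--     else:
--       best_hand_type = determine_hand_type(cards)
--
--     return (best_hand_type, *card_rank(cards))  # Use card_rank for tie-breaking
--
--   return sorted(hands, key=hand_rank, reverse=True)
--
-- def replace_cards(cards, replacements):
--   j_indices = []
--   replaced_cards = cards[:]
--   for i, card in enumerate(cards):
--     if card == "J":
--       j_indices.append(i)
--   for index, j in enumerate(j_indices):
--     replaced_cards = replaced_cards.replace(replaced_cards[j], replacements[index], 1)
--   return replaced_cards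
--
-- def determine_hand_type(cards):
--   """Determines the hand type without considering wild cards."""
--   card_counts = collections.Counter(cards)
--   most_common = card_counts.most_common()
--
--   hand_type = (
--     9 if len(most_common) == 1 else  # Five of a kind
--     8 if most_common[0][1] == 4 else  # Four of a kind
--     7 if most_common[0][1] == 3 and most_common[1][1] == 2 else  # Full house
--     6 if most_common[0][1] == 3 else  # Three of a kind
--     5 if len(most_common) == 3 else  # Two pair
--     4 if len(most_common) == 4 else  # One pair
--     3  # High card
--   )
--
--   return hand_type
-- ===== SOURCE B (Python) =====
-- import collections
--
-- def sort_hands(hands):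
--   ORDER = "J23456789TQKA"
--   POOL = "23456789TQKA"
--
--   def type_of(counts):
--     # counts: all group sizes sorted in descending order
--     return (
--       9 if len(counts) == 1 else
--       8 if counts[0] == 4 else
--       7 if counts[0] == 3 and counts[1] == 2 else
--       6 if counts[0] == 3 else
--       5 if len(counts) == 3 else
--       4 if len(counts) == 4 else
--       3
--     )
--
--   def best_type(cards):
--     j = cards.count("J")
--     # fixed part: counts of cards outside the 13 ranks (jokers can never join them)
--     others = [v for ch, v in collections.Counter(cards).items() if ch not in ORDER]
--     # joker-reachable part: sorted 12-vector of pool-rank counts, explored as a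
--     # canonical state space (one bump per distinct value), deduplicated per level
--     frontier = [tuple(sorted(cards.count(c) for c in POOL))]
--     for _ in range(j):
--       nxt = []
--       for st in frontier:
--         for i in range(12):
--           succ = tuple(sorted(st[:i] + (st[i] + 1,) + st[i + 1:]))
--           if succ not in nxt:
--             nxt.append(succ)
--       frontier = nxt
--     best = 0
--     for st in frontier:
--       counts = sorted([v for v in st if v > 0] + others, reverse=True)
--       best = max(best, type_of(counts))
--     return best
--
--   def key(hand):
--     cards = hand[0]
--     return (best_type(cards), *[ORDER.find(c) for c in cards])
--
--   return sorted(hands, key=key, reverse=True)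
-- ===== Notes on version B (the rewrite author's own statement) =====
-- stated objective: alternative
-- what changed: Per hand, A enumerates all 12^J replacement tuples with itertools.product, building a replaced string and a Counter for each candidate; B never materialises replacements: it runs a level-by-level deduplicated search over canonical states (the sorted 12-vector of rank counts) in which each joker bumps one entry and re-sorts, and classifies each distinct reachable count multiset against the fixed counts of off-rank characters.
import Mathlib
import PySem

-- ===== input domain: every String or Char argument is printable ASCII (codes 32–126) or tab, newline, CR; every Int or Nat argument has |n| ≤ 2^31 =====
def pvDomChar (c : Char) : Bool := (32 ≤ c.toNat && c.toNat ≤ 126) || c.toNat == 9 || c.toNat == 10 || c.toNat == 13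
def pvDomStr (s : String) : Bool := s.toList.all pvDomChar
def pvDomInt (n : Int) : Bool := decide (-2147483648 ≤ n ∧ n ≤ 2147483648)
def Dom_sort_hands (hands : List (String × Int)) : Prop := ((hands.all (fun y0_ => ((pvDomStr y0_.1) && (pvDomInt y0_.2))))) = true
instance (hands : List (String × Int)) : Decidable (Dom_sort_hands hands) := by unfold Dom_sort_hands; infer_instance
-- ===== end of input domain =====

-- B replaces A's 12^J enumeration of replacement tuples (building a replaced string and a Counter
-- for each) by a per-level deduplicated search over canonical (sorted) pool-count states: each
-- joker bumps one entry of the sorted 12-vector of rank counts, so only distinct count multisets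
-- are ever classified; same return value, different algorithm.

-- ===== PORT A =====

-- "J23456789TQKA".find(card) loop (appends into ranks)
def card_rank (hand : String) : List Int :=
  hand.toList.foldl (fun ranks card => ranks ++ [PySem.Chars.find "J23456789TQKA".toList [card]]) []

-- determine_hand_type: Counter + most_common(); CPython's most_common() is
-- sorted(items, key=value, reverse=True).  The pyGetD default (' ', 0) is only reached when
-- cards = [] (Python raises IndexError there; such hands are outside Pre_).
def determine_hand_type (cards : List Char) : Int :=
  let card_counts := PySem.Dict.counter cards
  let most_common := PySem.List.sorted card_counts.items (fun kv => kv.2) true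
  if most_common.length == 1 then 9
  else if (PySem.List.pyGetD most_common 0 (' ', 0)).2 == 4 then 8
  else if (PySem.List.pyGetD most_common 0 (' ', 0)).2 == 3
          && (PySem.List.pyGetD most_common 1 (' ', 0)).2 == 2 then 7
  else if (PySem.List.pyGetD most_common 0 (' ', 0)).2 == 3 then 6
  else if most_common.length == 3 then 5
  else if most_common.length == 4 then 4
  else 3

-- hand port of str.replace(old, new, 1) for a 1-character old/new (the only call shape in A); exact
def replaceFirst (s : List Char) (old new : Char) : List Char :=
  match s with
  | [] => []
  | c :: t => if c == old then new :: t else c :: replaceFirst t old new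

def replace_cards (cards : List Char) (replacements : List Char) : List Char :=
  let j_indices := (PySem.List.enumerate cards).foldl
    (fun acc ic => if ic.2 == 'J' then acc ++ [ic.1] else acc) []
  (PySem.List.enumerate j_indices).foldl
    (fun replaced p =>
      replaceFirst replaced (PySem.List.pyGetD replaced p.2 ' ') (PySem.List.pyGetD replacements p.1 ' '))
    cards

-- itertools.product(pool, repeat=n), in iteration order
def pyProduct (pool : List Char) : Nat → List (List Char)
  | 0 => [[]]
  | n + 1 => pool.flatMap (fun c => (pyProduct pool n).map (fun t => c :: t))

-- the nested hand_rank; cards.count("J") with a 1-character needle = character count (exact);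
-- the variable-length Python tuple (best_hand_type, *ranks) is a List Int compared lexicographically
def hand_rank (hand : String × Int) : List Int :=
  let cards := hand.1.toList
  let best_hand_type : Int :=
    if 0 < cards.count 'J' then
      (pyProduct "23456789TQKA".toList (cards.count 'J')).foldl
        (fun best t => max best (determine_hand_type (replace_cards cards t))) 0
    else determine_hand_type cards
  best_hand_type :: card_rank hand.1

def sort_hands (hands : List (String × Int)) : List (String × Int) :=
  PySem.List.sorted hands hand_rank true

-- ===== PORT B =====

-- classify from the descending list of group sizes; the pyGetD default 0 is only reached for an
-- empty hand (Python B raises IndexError there; outside Pre_)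
def type_of_counts (counts : List Int) : Int :=
  if counts.length == 1 then 9
  else if PySem.List.pyGetD counts 0 0 == 4 then 8
  else if PySem.List.pyGetD counts 0 0 == 3 && PySem.List.pyGetD counts 1 0 == 2 then 7
  else if PySem.List.pyGetD counts 0 0 == 3 then 6
  else if counts.length == 3 then 5
  else if counts.length == 4 then 4
  else 3

-- counts of the cards outside the 13 ranks ([v for ch, v in Counter(cards).items() if ch not in ORDER];
-- 'ch not in ORDER' on a 1-character ch is exactly character membership)
def others_of (cards : List Char) : List Int :=
  ((PySem.Dict.counter cards).items.filter
    (fun kv => !("J23456789TQKA".toList.contains kv.1))).map (fun kv => kv.2)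

-- tuple(sorted(cards.count(c) for c in POOL))
def start_of (cards : List Char) : List Int :=
  PySem.List.sorted ("23456789TQKA".toList.map (fun c => (cards.count c : Int)))
    (fun v => v) false

-- tuple(sorted(st[:i] + (st[i] + 1,) + st[i+1:])); st always has length 12, i < 12, so
-- take/drop/getD are exactly the Python slices and st[i]
def bumpAt (st : List Int) (i : Nat) : List Int :=
  PySem.List.sorted (st.take i ++ [PySem.List.pyGetD st (i : Int) 0 + 1] ++ st.drop (i + 1))
    (fun v => v) false

-- the body of 'for st in frontier: for i in range(12): … if succ not in nxt: nxt.append(succ)'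
def stepFrontier (frontier : List (List Int)) : List (List Int) :=
  frontier.foldl (fun nxt st =>
    (List.range 12).foldl (fun nxt2 i =>
      if bumpAt st i ∈ nxt2 then nxt2 else nxt2 ++ [bumpAt st i]) nxt) []

-- 'for _ in range(j): frontier = step(frontier)'
def frontierIter : Nat → List (List Int) → List (List Int)
  | 0, fr => fr
  | n + 1, fr => frontierIter n (stepFrontier fr)

def best_type (cards : List Char) : Int :=
  let others := others_of cards
  let frontier := frontierIter (cards.count 'J') [start_of cards]
  frontier.foldl (fun best st =>
    max best (type_of_counts
      (PySem.List.sorted (st.filter (fun v => decide (0 < v)) ++ others) (fun v => v) true))) 0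

def key_alt (hand : String × Int) : List Int :=
  best_type hand.1.toList
    :: hand.1.toList.map (fun c => PySem.Chars.find "J23456789TQKA".toList [c])

def sort_hands_alt (hands : List (String × Int)) : List (String × Int) :=
  PySem.List.sorted hands key_alt true

-- ===== PRECONDITION & SPEC =====

-- Python A raises IndexError on a hand whose card string is empty (most_common()[0] on an empty
-- Counter); Pre_ excludes exactly those inputs.
def Pre_sort_hands (hands : List (String × Int)) : Prop := ∀ p ∈ hands, p.1 ≠ ""
instance (hands : List (String × Int)) : Decidable (Pre_sort_hands hands) := by
  unfold Pre_sort_hands; infer_instance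

def pvWitness_sort_hands : (List (String × Int)) := [("32T3K", 765), ("T55J5", 684), ("KTJJT", 220)]

def Spec_sort_hands (hands : List (String × Int)) (out : List (String × Int)) : Prop :=
  out = sort_hands_alt hands
instance (hands : List (String × Int)) (out : List (String × Int)) : Decidable (Spec_sort_hands hands out) := by
  unfold Spec_sort_hands; infer_instance

-- ===== CLAIM (what is proved, stated in full; the proofs are below) =====
def Claim_equal_sort_hands : Prop := ∀ (hands : List (String × Int)), Dom_sort_hands hands → Pre_sort_hands hands → Spec_sort_hands hands (sort_hands hands)

-- ===== LEMMAS AND PROOFS =====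

-- abbreviations used only by the proofs
def sortA (l : List Int) : List Int := PySem.List.sorted l (fun v => v) false
def sortD (l : List Int) : List Int := PySem.List.sorted l (fun v => v) true
def poolL : List Char := "23456789TQKA".toList
def ordL : List Char := "J23456789TQKA".toList
def cnt (t : List Char) : List Int := poolL.map (fun d => ((t.count d : Nat) : Int))
def vadd (b : List Int) (t : List Char) : List Int := List.zipWith (fun x y => x + y) b (cnt t)
def base_of (cards : List Char) : List Int := poolL.map (fun c => ((cards.count c : Nat) : Int))
def incAt (l : List Int) (i : Nat) : List Int :=
  l.take i ++ [l.getD i 0 + 1] ++ l.drop (i + 1)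

theorem sortA_perm (l : List Int) : (sortA l).Perm l := PySem.List.sorted_perm l _ false

theorem poolL_eq : poolL = ['2','3','4','5','6','7','8','9','T','Q','K','A'] := rfl
theorem ordL_eq : ordL = 'J' :: poolL := rfl
theorem poolL_nodup : poolL.Nodup := by rw [poolL_eq]; decide
theorem poolL_length : poolL.length = 12 := by rw [poolL_eq]; decide
theorem poolL_no_J : ∀ c ∈ poolL, c ≠ 'J' := by
  intro c hc
  rw [poolL_eq] at hc
  fin_cases hc <;> decide

-- ---- generic helpers ----

theorem snd_getD (l : List (Char × Int)) (i : Nat) :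
    (l.getD i (' ', 0)).2 = (l.map (fun kv => kv.2)).getD i 0 := by
  induction l generalizing i with
  | nil => cases i <;> simp [List.getD]
  | cons x t ih => cases i with
    | zero => simp
    | succ n => simpa using ih n

theorem sortD_congr (l1 l2 : List Int) (h : l1.Perm l2) : sortD l1 = sortD l2 := by
  have pw1 := PySem.List.sorted_pairwise_rev l1 (fun v => v)
  have pw2 := PySem.List.sorted_pairwise_rev l2 (fun v => v)
  have hp : (sortD l1).Perm (sortD l2) :=
    (PySem.List.sorted_perm l1 _ true).trans (h.trans (PySem.List.sorted_perm l2 _ true).symm)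
  exact List.eq_of_perm_of_sorted (fun a b _ _ hab hba => le_antisymm hba hab) pw1 pw2 hp

theorem sortA_congr (l1 l2 : List Int) (h : l1.Perm l2) : sortA l1 = sortA l2 := by
  have pw1 := PySem.List.sorted_pairwise l1 (fun v => v)
  have pw2 := PySem.List.sorted_pairwise l2 (fun v => v)
  have hp : (sortA l1).Perm (sortA l2) :=
    (PySem.List.sorted_perm l1 _ false).trans (h.trans (PySem.List.sorted_perm l2 _ false).symm)
  exact List.eq_of_perm_of_sorted (fun a b _ _ hab hba => le_antisymm hab hba) pw1 pw2 hp

theorem map_snd_sorted (items : List (Char × Int)) :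
    (PySem.List.sorted items (fun kv => kv.2) true).map (fun kv => kv.2)
      = sortD (items.map (fun kv => kv.2)) := by
  have pw1 : ((PySem.List.sorted items (fun kv => kv.2) true).map (fun kv => kv.2)).Pairwise
      (fun a b : Int => b ≤ a) :=
    List.Pairwise.map _ (fun _ _ hab => hab) (PySem.List.sorted_pairwise_rev items (fun kv => kv.2))
  have pw2 := PySem.List.sorted_pairwise_rev (items.map (fun kv => kv.2)) (fun v => v)
  have hp : ((PySem.List.sorted items (fun kv => kv.2) true).map (fun kv => kv.2)).Perm
      (sortD (items.map (fun kv => kv.2))) :=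
    ((PySem.List.sorted_perm items _ true).map _).trans
      (PySem.List.sorted_perm (items.map (fun kv => kv.2)) _ true).symm
  exact List.eq_of_perm_of_sorted (fun a b _ _ hab hba => le_antisymm hba hab) pw1 pw2 hp

theorem foldl_max_cases {α : Type} (L : List α) (f : α → Int) (a : Int) :
    L.foldl (fun b x => max b (f x)) a = a ∨ ∃ x ∈ L, L.foldl (fun b x => max b (f x)) a = f x := by
  induction L generalizing a with
  | nil => exact Or.inl rfl
  | cons x t ih =>
    simp only [List.foldl_cons]
    rcases ih (max a (f x)) with h | ⟨y, hy, he⟩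
    · rcases max_choice a (f x) with h2 | h2
      · exact Or.inl (by rw [h, h2])
      · exact Or.inr ⟨x, List.mem_cons_self .., by rw [h, h2]⟩
    · exact Or.inr ⟨y, List.mem_cons_of_mem _ hy, he⟩

theorem foldl_max_congr {α β : Type} (L1 : List α) (L2 : List β) (f : α → Int) (g : β → Int)
    (h1 : ∀ t ∈ L1, ∃ m ∈ L2, g m = f t) (h2 : ∀ m ∈ L2, ∃ t ∈ L1, f t = g m) :
    L1.foldl (fun b x => max b (f x)) 0 = L2.foldl (fun b x => max b (g x)) 0 := by
  apply le_antisymm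
  · rcases foldl_max_cases L1 f 0 with h | ⟨t, ht, he⟩
    · rw [h]; exact (PySem.List.le_foldl_max_int L2 g 0).1
    · rw [he]
      obtain ⟨m, hm, hgm⟩ := h1 t ht
      rw [← hgm]
      exact (PySem.List.le_foldl_max_int L2 g 0).2 m hm
  · rcases foldl_max_cases L2 g 0 with h | ⟨m, hm, he⟩
    · rw [h]; exact (PySem.List.le_foldl_max_int L1 f 0).1
    · rw [he]
      obtain ⟨t, ht, hft⟩ := h2 m hm
      rw [← hft]
      exact (PySem.List.le_foldl_max_int L1 f 0).2 t ht

-- ---- hand-type lemmas (A side) ----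

theorem type_eq_determine (x : List Char) :
    type_of_counts (sortD (PySem.Dict.counter x).values) = determine_hand_type x := by
  simp only [type_of_counts, determine_hand_type]
  rw [show (PySem.Dict.counter x).values = ((PySem.Dict.counter x).items).map (fun kv => kv.2) from rfl]
  rw [← map_snd_sorted]
  simp only [List.length_map, PySem.List.pyGetD_zero, PySem.List.pyGetD_ofNat', ← snd_getD]

theorem determine_perm {x y : List Char} (h : x.Perm y) :
    determine_hand_type x = determine_hand_type y := by
  have hfun : (fun k : Char => (k, (List.count k x : Int))) = (fun k => (k, (List.count k y : Int))) :=
    funext fun k => by rw [h.count_eq]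
  have hite : ((PySem.Dict.counter x).items).Perm ((PySem.Dict.counter y).items) := by
    rw [PySem.Dict.items_counter, PySem.Dict.items_counter, hfun]
    refine List.Perm.map _ ?_
    exact (List.perm_ext_iff_of_nodup (PySem.Set.nodup_ofList x) (PySem.Set.nodup_ofList y)).mpr
      (fun a => by simp only [PySem.Set.mem_ofList]; exact ⟨fun hx => h.mem_iff.mp hx,
        fun hy => h.mem_iff.mpr hy⟩)
  have hlen : (PySem.List.sorted (PySem.Dict.counter x).items (fun kv => kv.2) true).length
      = (PySem.List.sorted (PySem.Dict.counter y).items (fun kv => kv.2) true).length := by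
    rw [PySem.List.length_sorted, PySem.List.length_sorted, hite.length_eq]
  have hmap : (PySem.List.sorted (PySem.Dict.counter x).items (fun kv => kv.2) true).map (fun kv => kv.2)
      = (PySem.List.sorted (PySem.Dict.counter y).items (fun kv => kv.2) true).map (fun kv => kv.2) := by
    rw [map_snd_sorted, map_snd_sorted]
    exact sortD_congr _ _ (hite.map _)
  simp only [determine_hand_type, PySem.List.pyGetD_zero, PySem.List.pyGetD_ofNat', snd_getD]
  rw [hlen, hmap]

-- ---- replace_cards characterisation (A side) ----

def jposI : List Char → Int → List Int
  | [], _ => []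
  | c :: v, i => if c = 'J' then i :: jposI v (i + 1) else jposI v (i + 1)

def substJ : List Char → List Char → List Char
  | [], _ => []
  | c :: v, ts =>
    if c = 'J' then
      match ts with
      | [] => c :: substJ v []
      | r :: ts' => r :: substJ v ts'
    else c :: substJ v ts

theorem enumerate_cons {α : Type} (x : α) (t : List α) (s : Int) :
    PySem.List.enumerate (x :: t) s = (s, x) :: PySem.List.enumerate t (s + 1) := rfl

theorem jindices_eq (cards : List Char) (i : Int) :
    ((PySem.List.enumerate cards i).filter (fun ic => ic.2 == 'J')).map (fun ic => ic.1)
      = jposI cards i := by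
  induction cards generalizing i with
  | nil => rfl
  | cons c v ih =>
    rw [enumerate_cons, List.filter_cons]
    by_cases hc : c = 'J'
    · simp [jposI, hc, ih]
    · simp [jposI, hc, ih]

theorem replaceFirst_append (a v : List Char) (r : Char) (ha : 'J' ∉ a) :
    replaceFirst (a ++ 'J' :: v) 'J' r = a ++ r :: v := by
  induction a with
  | nil => simp [replaceFirst]
  | cons c t ih =>
    have hc : c ≠ 'J' := fun hcc => ha (by simp [hcc])
    simp only [List.cons_append, replaceFirst, beq_iff_eq, if_neg hc]
    rw [ih (fun hm => ha (List.mem_cons_of_mem _ hm))]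

theorem fold_replace : ∀ (w ts a : List Char) (i0 : Int), 'J' ∉ a → (∀ c ∈ ts, c ≠ 'J') →
    0 ≤ i0 → ((w.count 'J' : Int) + i0 = ts.length) →
    (PySem.List.enumerate (jposI w (a.length : Int)) i0).foldl
      (fun replaced p =>
        replaceFirst replaced (PySem.List.pyGetD replaced p.2 ' ') (PySem.List.pyGetD ts p.1 ' '))
      (a ++ w)
    = a ++ substJ w (ts.drop i0.toNat) := by
  intro w
  induction w with
  | nil =>
    intro ts a i0 _ _ _ _
    simp [jposI, substJ, PySem.List.enumerate]
  | cons c v ih =>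
    intro ts a i0 ha hts hi0 hlen
    by_cases hc : c = 'J'
    · subst hc
      have hcnt : ('J' :: v).count 'J' = v.count 'J' + 1 := by simp [List.count_cons]
      rw [hcnt] at hlen
      push_cast at hlen
      have hilt : i0 < (ts.length : Int) := by omega
      have hbound : i0.toNat < ts.length := by omega
      simp only [jposI, reduceIte, enumerate_cons, List.foldl_cons, Prod.fst, Prod.snd]
      have hget1 : PySem.List.pyGetD (a ++ 'J' :: v) ((a.length : Int)) ' ' = 'J' := by
        rw [PySem.List.pyGetD_natCast, List.getD_eq_getElem?_getD,
          List.getElem?_append_right (Nat.le_refl _)]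
        simp
      have hget2 : PySem.List.pyGetD ts i0 ' ' = ts[i0.toNat] :=
        PySem.List.pyGetD_eq_getElem ts ' ' hi0 hilt
      have hrJ : ts[i0.toNat] ≠ 'J' := hts _ (List.getElem_mem _)
      rw [hget1, hget2, replaceFirst_append a v _ ha]
      rw [show a ++ ts[i0.toNat] :: v = (a ++ [ts[i0.toNat]]) ++ v from by simp]
      rw [show ((a.length : Int) + 1) = (((a ++ [ts[i0.toNat]]).length : Int)) from by simp]
      rw [ih ts (a ++ [ts[i0.toNat]]) (i0 + 1)
        (by simp [ha, hrJ.symm]) hts (by omega) (by push_cast; omega)]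
      rw [List.drop_eq_getElem_cons hbound]
      have htn : (i0 + 1).toNat = i0.toNat + 1 := by omega
      simp [substJ, htn]
    · have hcnt : (c :: v).count 'J' = v.count 'J' := by simp [List.count_cons, hc, Ne.symm hc]
      rw [hcnt] at hlen
      simp only [jposI, if_neg hc]
      rw [show ((a.length : Int) + 1) = (((a ++ [c]).length : Int)) from by simp]
      rw [show a ++ c :: v = (a ++ [c]) ++ v from by simp]
      rw [ih ts (a ++ [c]) i0 (by simp [ha, Ne.symm hc]) hts hi0 hlen]
      simp [substJ, hc]

theorem replace_cards_eq_substJ (cards ts : List Char)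
    (hts : ∀ c ∈ ts, c ≠ 'J') (hlen : cards.count 'J' = ts.length) :
    replace_cards cards ts = substJ cards ts := by
  unfold replace_cards
  rw [PySem.List.foldl_append_if, List.nil_append, jindices_eq cards 0]
  have h := fold_replace cards ts [] 0 (by simp) hts (le_refl 0) (by simp [hlen])
  simpa using h

theorem substJ_perm : ∀ (w ts : List Char), w.count 'J' = ts.length →
    (substJ w ts).Perm (w.filter (fun c => c != 'J') ++ ts) := by
  intro w
  induction w with
  | nil =>
    intro ts hlen
    have : ts = [] := by
      have : ts.length = 0 := by simpa using hlen.symm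
      exact List.length_eq_zero_iff.mp this
    simp [substJ, this]
  | cons c v ih =>
    intro ts hlen
    by_cases hc : c = 'J'
    · subst hc
      have hcnt : ('J' :: v).count 'J' = v.count 'J' + 1 := by simp [List.count_cons]
      rw [hcnt] at hlen
      cases ts with
      | nil => simp at hlen
      | cons r ts' =>
        have hlen' : v.count 'J' = ts'.length := by simpa using hlen
        have step : (substJ ('J' :: v) (r :: ts')) = r :: substJ v ts' := by simp [substJ]
        rw [step]
        have hfil : ('J' :: v).filter (fun c => c != 'J') = v.filter (fun c => c != 'J') := by simp
        rw [hfil]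
        exact ((ih ts' hlen').cons r).trans (List.perm_middle).symm
    · have hcnt : (c :: v).count 'J' = v.count 'J' := by simp [List.count_cons, hc, Ne.symm hc]
      rw [hcnt] at hlen
      have step : (substJ (c :: v) ts) = c :: substJ v ts := by simp [substJ, hc]
      rw [step]
      have hfil : (c :: v).filter (fun c => c != 'J') = c :: v.filter (fun c => c != 'J') := by
        simp [hc]
      rw [hfil, List.cons_append]
      exact (ih ts hlen).cons c

theorem mem_pyProduct (pool : List Char) : ∀ (n : Nat) (t : List Char),
    t ∈ pyProduct pool n ↔ t.length = n ∧ ∀ c ∈ t, c ∈ pool := by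
  intro n
  induction n with
  | zero =>
    intro t
    simp only [pyProduct, List.mem_singleton]
    constructor
    · rintro rfl; simp
    · rintro ⟨hl, _⟩; exact List.length_eq_zero_iff.mp hl
  | succ n ih =>
    intro t
    simp only [pyProduct, List.mem_flatMap, List.mem_map]
    constructor
    · rintro ⟨c, hc, t', ht', rfl⟩
      obtain ⟨hl, hs⟩ := (ih t').mp ht'
      refine ⟨by simp [hl], ?_⟩
      intro d hd
      rcases List.mem_cons.mp hd with rfl | hd'
      · exact hc
      · exact hs d hd'
    · rintro ⟨hl, hs⟩
      cases t with
      | nil => simp at hl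
      | cons c t' =>
        exact ⟨c, hs c (by simp), t',
          (ih t').mpr ⟨by simpa using hl, fun d hd => hs d (by simp [hd])⟩, rfl⟩

-- ---- B side: frontier membership plumbing ----

theorem mem_dedup_foldl (st : List Int) (l : List Nat) :
    ∀ (init : List (List Int)) (a : List Int),
      (a ∈ l.foldl (fun nxt2 i =>
          if bumpAt st i ∈ nxt2 then nxt2 else nxt2 ++ [bumpAt st i]) init
        ↔ a ∈ init ∨ ∃ i ∈ l, a = bumpAt st i) := by
  induction l with
  | nil => intro init a; simp
  | cons x xs ih =>
    intro init a
    simp only [List.foldl_cons]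
    by_cases hx : bumpAt st x ∈ init
    · rw [if_pos hx, ih]
      simp only [List.mem_cons]
      constructor
      · rintro (h | ⟨i, hi, he⟩)
        · exact Or.inl h
        · exact Or.inr ⟨i, Or.inr hi, he⟩
      · rintro (h | ⟨i, rfl | hi, he⟩)
        · exact Or.inl h
        · exact Or.inl (he ▸ hx)
        · exact Or.inr ⟨i, hi, he⟩
    · rw [if_neg hx, ih]
      simp only [List.mem_append, List.mem_singleton, List.mem_cons, List.not_mem_nil, or_false]
      constructor
      · rintro ((h | h) | ⟨i, hi, he⟩)
        · exact Or.inl h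
        · exact Or.inr ⟨x, Or.inl rfl, h⟩
        · exact Or.inr ⟨i, Or.inr hi, he⟩
      · rintro (h | ⟨i, rfl | hi, he⟩)
        · exact Or.inl (Or.inl h)
        · exact Or.inl (Or.inr he)
        · exact Or.inr ⟨i, hi, he⟩

theorem mem_stepFrontier_gen (fr : List (List Int)) :
    ∀ (init : List (List Int)) (a : List Int),
      (a ∈ fr.foldl (fun nxt st =>
          (List.range 12).foldl (fun nxt2 i =>
            if bumpAt st i ∈ nxt2 then nxt2 else nxt2 ++ [bumpAt st i]) nxt) init
        ↔ a ∈ init ∨ ∃ st ∈ fr, ∃ i < 12, a = bumpAt st i) := by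
  induction fr with
  | nil => intro init a; simp
  | cons st fr ih =>
    intro init a
    simp only [List.foldl_cons]
    rw [ih, mem_dedup_foldl st (List.range 12) init a]
    simp only [List.mem_range, List.mem_cons]
    constructor
    · rintro ((h | ⟨i, hi, he⟩) | ⟨st2, hst2, i, hi, he⟩)
      · exact Or.inl h
      · exact Or.inr ⟨st, Or.inl rfl, i, hi, he⟩
      · exact Or.inr ⟨st2, Or.inr hst2, i, hi, he⟩
    · rintro (h | ⟨st2, rfl | hst2, i, hi, he⟩)
      · exact Or.inl (Or.inl h)
      · exact Or.inl (Or.inr ⟨i, hi, he⟩)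
      · exact Or.inr ⟨st2, hst2, i, hi, he⟩

theorem mem_stepFrontier (fr : List (List Int)) (a : List Int) :
    a ∈ stepFrontier fr ↔ ∃ st ∈ fr, ∃ i < 12, a = bumpAt st i := by
  unfold stepFrontier
  rw [mem_stepFrontier_gen fr [] a]
  simp

-- ---- B side: one bump on sorted states ----

theorem incAt_cons (x : Int) (xs : List Int) (p : Nat) :
    incAt (x :: xs) (p + 1) = x :: incAt xs p := by
  simp [incAt, List.take_succ_cons, List.getD_cons_succ, List.drop_succ_cons]

theorem incAt_zero (x : Int) (xs : List Int) : incAt (x :: xs) 0 = (x + 1) :: xs := by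
  simp [incAt, List.getD_cons_zero]

theorem bumpAt_eq_sortA_incAt (st : List Int) (i : Nat) :
    bumpAt st i = sortA (incAt st i) := by
  simp [bumpAt, sortA, incAt, PySem.List.pyGetD_natCast]

theorem incAt_perm_pair (l : List Int) (i : Nat) (h : i < l.length) :
    l.Perm (l.getD i 0 :: (l.take i ++ l.drop (i + 1)))
      ∧ (incAt l i).Perm ((l.getD i 0 + 1) :: (l.take i ++ l.drop (i + 1))) := by
  constructor
  · have h1 : l = l.take i ++ l[i] :: l.drop (i + 1) := by simp
    rw [List.getD_eq_getElem l 0 h]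
    conv_lhs => rw [h1]
    exact List.perm_middle
  · have h2 : incAt l i = l.take i ++ (l.getD i 0 + 1) :: l.drop (i + 1) := by simp [incAt]
    rw [h2]
    exact List.perm_middle

theorem bump_sort_eq (st v : List Int) (hp : st.Perm v) (i p : Nat)
    (hi : i < st.length) (hq : p < v.length) (hx : st.getD i 0 = v.getD p 0) :
    sortA (incAt st i) = sortA (incAt v p) := by
  obtain ⟨h1, h2⟩ := incAt_perm_pair st i hi
  obtain ⟨h3, h4⟩ := incAt_perm_pair v p hq
  rw [← hx] at h3 h4
  have hrest : (st.take i ++ st.drop (i + 1)).Perm (v.take p ++ v.drop (p + 1)) :=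
    (h1.symm.trans (hp.trans h3)).cons_inv
  exact sortA_congr _ _ (h2.trans ((hrest.cons _).trans h4.symm))

-- ---- B side: count vectors ----

theorem length_cnt (t : List Char) : (cnt t).length = 12 := by
  unfold cnt; rw [List.length_map, poolL_length]

theorem length_vadd (b : List Int) (t : List Char) (hb : b.length = 12) :
    (vadd b t).length = 12 := by
  unfold vadd; rw [List.length_zipWith, hb, length_cnt]; rfl

theorem cnt_cons_at (L : List Char) (hnd : L.Nodup) :
    ∀ (p : Nat) (hp : p < L.length) (t : List Char),
      L.map (fun d => (((L[p] :: t).count d : Nat) : Int))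
        = incAt (L.map (fun d => ((t.count d : Nat) : Int))) p := by
  induction L with
  | nil => intro p hp; simp at hp
  | cons c Ls ih =>
    intro p hp t
    cases p with
    | zero =>
      simp only [List.map_cons, List.getElem_cons_zero]
      rw [incAt_zero]
      simp only [List.cons.injEq]
      refine ⟨?_, ?_⟩
      · rw [List.count_cons_self]; push_cast; ring
      · apply List.map_congr_left
        intro d hd
        have hdc : d ≠ c := fun hdc => (List.nodup_cons.mp hnd).1 (hdc ▸ hd)
        rw [List.count_cons_of_ne (Ne.symm hdc)]
    | succ p =>
      have hp' : p < Ls.length := by simpa using hp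
      rw [List.map_cons, List.map_cons, incAt_cons]
      simp only [List.getElem_cons_succ, List.cons.injEq]
      refine ⟨?_, ?_⟩
      · have hne : c ≠ Ls[p] := fun hc => (List.nodup_cons.mp hnd).1 (hc ▸ List.getElem_mem hp')
        rw [List.count_cons_of_ne (Ne.symm hne)]
      · exact ih (List.nodup_cons.mp hnd).2 p hp' t



theorem zip_incAt : ∀ (b e : List Int) (p : Nat), p < b.length → p < e.length →
    List.zipWith (fun x y => x + y) b (incAt e p)
      = incAt (List.zipWith (fun x y => x + y) b e) p := by
  intro b
  induction b with
  | nil => intro e p hb; simp at hb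
  | cons x bs ih =>
    intro e p hb he
    cases e with
    | nil => simp at he
    | cons y es =>
      cases p with
      | zero =>
        rw [incAt_zero]
        simp only [List.zipWith_cons_cons]
        rw [incAt_zero, show x + (y + 1) = x + y + 1 from by ring]
      | succ p =>
        rw [incAt_cons]
        simp only [List.zipWith_cons_cons]
        rw [incAt_cons, ih es p (by simpa using hb) (by simpa using he)]

theorem vadd_cons (b : List Int) (hb : b.length = 12) (p : Nat) (hp : p < 12) (t : List Char) :
    vadd b (poolL[p]'(by rw [poolL_length]; exact hp) :: t) = incAt (vadd b t) p := by
  unfold vadd cnt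
  rw [cnt_cons_at poolL poolL_nodup p (by rw [poolL_length]; exact hp) t]
  exact zip_incAt b _ p (by rw [hb]; exact hp) (by rw [List.length_map, poolL_length]; exact hp)

theorem zip_add_zeros : ∀ (b z : List Int), b.length ≤ z.length → (∀ y ∈ z, y = 0) →
    List.zipWith (fun x y => x + y) b z = b := by
  intro b
  induction b with
  | nil => intro z _ _; simp
  | cons x bs ih =>
    intro z hl hz
    cases z with
    | nil => simp at hl
    | cons y zs =>
      have hy : y = 0 := hz y (List.mem_cons_self ..)
      rw [List.zipWith_cons_cons, hy, add_zero,
        ih zs (by simpa using hl) (fun w hw => hz w (List.mem_cons_of_mem _ hw))]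

theorem vadd_nil (b : List Int) (hb : b.length = 12) : vadd b [] = b := by
  unfold vadd cnt
  apply zip_add_zeros
  · rw [List.length_map, poolL_length, hb]
  · intro y hy
    obtain ⟨d, _, hd⟩ := List.mem_map.mp hy
    simpa using hd.symm

-- frontier characterisation: states after m bumps are exactly the sorted vectors base + counts(t)
def FrChar (base : List Int) (m : Nat) (F : List (List Int)) : Prop :=
  ∀ st, st ∈ F ↔ ∃ t : List Char, t.length = m ∧ (∀ c ∈ t, c ∈ poolL) ∧ st = sortA (vadd base t)

theorem st_length (base : List Int) (hb : base.length = 12) (t : List Char) :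
    (sortA (vadd base t)).length = 12 := by
  unfold sortA
  rw [PySem.List.length_sorted, length_vadd base t hb]

theorem step_char (base : List Int) (hb : base.length = 12) (m : Nat) (F : List (List Int))
    (h : FrChar base m F) : FrChar base (m + 1) (stepFrontier F) := by
  intro a
  rw [mem_stepFrontier]
  constructor
  · rintro ⟨st, hst, i, hi, rfl⟩
    obtain ⟨t, hlen, hsub, rfl⟩ := (h st).mp hst
    have hi' : i < (sortA (vadd base t)).length := by rw [st_length base hb t]; exact hi
    have hxmem : (sortA (vadd base t)).getD i 0 ∈ vadd base t := by
      rw [List.getD_eq_getElem _ 0 hi']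
      exact (sortA_perm (vadd base t)).mem_iff.mp (List.getElem_mem hi')
    obtain ⟨p, hp, hpx⟩ := List.mem_iff_getElem.mp hxmem
    have hp12 : p < 12 := by rw [length_vadd base t hb] at hp; exact hp
    refine ⟨poolL[p]'(by rw [poolL_length]; exact hp12) :: t, by simp [hlen], ?_, ?_⟩
    · intro c hc
      rcases List.mem_cons.mp hc with rfl | hc'
      · exact List.getElem_mem _
      · exact hsub c hc'
    · rw [bumpAt_eq_sortA_incAt, vadd_cons base hb p hp12 t]
      exact bump_sort_eq _ _ (sortA_perm (vadd base t)) i p hi' hp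
        (by rw [List.getD_eq_getElem _ 0 hi', List.getD_eq_getElem _ 0 hp]
            exact ((List.getD_eq_getElem _ 0 hi') ▸ hpx.symm ▸ rfl))
  · rintro ⟨t', hlen, hsub, rfl⟩
    cases t' with
    | nil => simp at hlen
    | cons c t =>
      obtain ⟨p, hp, hpc⟩ := List.mem_iff_getElem.mp (hsub c (List.mem_cons_self ..))
      have hp12 : p < 12 := by rw [poolL_length] at hp; exact hp
      have hst : sortA (vadd base t) ∈ F := (h _).mpr
        ⟨t, by simpa using hlen, fun d hd => hsub d (List.mem_cons_of_mem _ hd), rfl⟩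
      have hxmem : (vadd base t).getD p 0 ∈ sortA (vadd base t) := by
        rw [List.getD_eq_getElem _ 0 (by rw [length_vadd base t hb]; exact hp12)]
        exact (sortA_perm (vadd base t)).symm.mem_iff.mp (List.getElem_mem _)
      obtain ⟨i, hi, hix⟩ := List.mem_iff_getElem.mp hxmem
      refine ⟨sortA (vadd base t), hst, i, by rw [st_length base hb t] at hi; exact hi, ?_⟩
      rw [bumpAt_eq_sortA_incAt]
      have heq : sortA (incAt (sortA (vadd base t)) i) = sortA (incAt (vadd base t) p) :=
        bump_sort_eq _ _ (sortA_perm (vadd base t)) i p hi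
          (by rw [length_vadd base t hb]; exact hp12)
          (by rw [List.getD_eq_getElem _ 0 hi, hix])
      rw [heq, ← vadd_cons base hb p hp12 t]
      have : poolL[p]'(by rw [poolL_length]; exact hp12) = c := hpc
      rw [this]

theorem iter_char (base : List Int) (hb : base.length = 12) :
    ∀ (k m : Nat) (F : List (List Int)), FrChar base m F →
      FrChar base (m + k) (frontierIter k F) := by
  intro k
  induction k with
  | zero => intro m F h; simpa using h
  | succ k ih =>
    intro m F h
    have := ih (m + 1) (stepFrontier F) (step_char base hb m F h)
    have harith : m + 1 + k = m + (k + 1) := by omega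
    rw [harith] at this
    exact this

theorem init_char (cards : List Char) : FrChar (base_of cards) 0 [start_of cards] := by
  intro st
  have hb : (base_of cards).length = 12 := by simp [base_of, poolL_length]
  have hstart : start_of cards = sortA (base_of cards) := rfl
  simp only [List.mem_singleton]
  constructor
  · rintro rfl
    exact ⟨[], rfl, by simp, by rw [hstart, vadd_nil _ hb]⟩
  · rintro ⟨t, hlen, _, rfl⟩
    rw [List.length_eq_zero_iff.mp hlen, vadd_nil _ hb, hstart]

-- ---- B side: the classified value of a state ----

theorem vadd_eq_countmap (cards t : List Char) (ht : ∀ c ∈ t, c ∈ poolL) :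
    vadd (base_of cards) t
      = poolL.map (fun c => (((cards.filter (fun x => x != 'J') ++ t).count c : Nat) : Int)) := by
  unfold vadd cnt base_of
  rw [List.zipWith_map, List.zipWith_self]
  apply List.map_congr_left
  intro c hc
  have hcJ : (c != 'J') = true := by
    simpa using poolL_no_J c hc
  rw [List.count_append, List.count_filter (p := fun x => x != 'J') hcJ]
  push_cast
  ring

theorem values_counter (u : List Char) :
    (PySem.Dict.counter u).values
      = (PySem.Set.ofList u).map (fun k => ((u.count k : Nat) : Int)) := by
  rw [show (PySem.Dict.counter u).values
      = (PySem.Dict.counter u).items.map (fun kv => kv.2) from rfl]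
  rw [PySem.Dict.items_counter, List.map_map]
  rfl

theorem counter_values_perm (cards t : List Char) (ht : ∀ c ∈ t, c ∈ poolL) :
    ((PySem.Dict.counter (cards.filter (fun c => c != 'J') ++ t)).values).Perm
      ((vadd (base_of cards) t).filter (fun v => decide (0 < v)) ++ others_of cards) := by
  rw [values_counter (cards.filter (fun c => c != 'J') ++ t), vadd_eq_countmap cards t ht]
  have hsplit : ((PySem.Set.ofList (cards.filter (fun c => c != 'J') ++ t)).map
        (fun k => (((cards.filter (fun c => c != 'J') ++ t).count k : Nat) : Int))).Perm
      (((PySem.Set.ofList (cards.filter (fun c => c != 'J') ++ t)).filter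
          (fun k => decide (k ∈ poolL))).map
        (fun k => (((cards.filter (fun c => c != 'J') ++ t).count k : Nat) : Int))
      ++ ((PySem.Set.ofList (cards.filter (fun c => c != 'J') ++ t)).filter
          (fun k => !decide (k ∈ poolL))).map
        (fun k => (((cards.filter (fun c => c != 'J') ++ t).count k : Nat) : Int))) := by
    rw [← List.map_append]
    exact (List.Perm.map _ (List.filter_append_perm (fun k => decide (k ∈ poolL))
      (PySem.Set.ofList (cards.filter (fun c => c != 'J') ++ t)))).symm
  refine hsplit.trans (List.Perm.append ?_ ?_)
  · -- pool ranks present in u  ~  positive entries of the count vector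
    rw [List.filter_map]
    apply List.Perm.map
    refine (List.perm_ext_iff_of_nodup
      ((PySem.Set.nodup_ofList (cards.filter (fun c => c != 'J') ++ t)).filter _)
      (poolL_nodup.filter _)).mpr ?_
    intro k
    simp only [List.mem_filter, PySem.Set.mem_ofList, Function.comp,
      decide_eq_true_eq, Int.natCast_pos, List.count_pos_iff]
    exact ⟨fun h => ⟨h.2, h.1⟩, fun h => ⟨h.2, h.1⟩⟩
  · -- cards outside the 13 ranks: counts in u equal counts in cards
    have hothers : others_of cards
        = ((PySem.Set.ofList cards).filter (fun k => !(ordL.contains k))).map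
            (fun k => ((cards.count k : Nat) : Int)) := by
      unfold others_of
      rw [show ("J23456789TQKA".toList : List Char) = ordL from rfl]
      rw [PySem.Dict.items_counter, List.filter_map, List.map_map]
      rfl
    rw [hothers]
    have hmemJ : ∀ k, k ∈ PySem.Set.ofList (cards.filter (fun c => c != 'J') ++ t) →
        k ∉ poolL → k ∈ cards ∧ k ≠ 'J' := by
      intro k hk hnp
      rw [PySem.Set.mem_ofList] at hk
      rcases List.mem_append.mp hk with hk1 | hk2
      · obtain ⟨hkc, hkJ⟩ := List.mem_filter.mp hk1
        exact ⟨hkc, by simpa using hkJ⟩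
      · exact absurd (ht k hk2) hnp
    have hcongr : ((PySem.Set.ofList (cards.filter (fun c => c != 'J') ++ t)).filter
          (fun k => !decide (k ∈ poolL))).map
        (fun k => (((cards.filter (fun c => c != 'J') ++ t).count k : Nat) : Int))
      = ((PySem.Set.ofList (cards.filter (fun c => c != 'J') ++ t)).filter
          (fun k => !decide (k ∈ poolL))).map
        (fun k => ((cards.count k : Nat) : Int)) := by
      apply List.map_congr_left
      intro k hk
      obtain ⟨hkD, hkP⟩ := List.mem_filter.mp hk
      have hnp : k ∉ poolL := by simpa using hkP
      obtain ⟨hkc, hkJ⟩ := hmemJ k hkD hnp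
      have hkt : k ∉ t := fun hkt => hnp (ht k hkt)
      rw [List.count_append, List.count_eq_zero.mpr hkt, Nat.add_zero,
        List.count_filter (p := fun x => x != 'J') (by simpa using hkJ)]
    rw [hcongr]
    apply List.Perm.map
    refine (List.perm_ext_iff_of_nodup
      ((PySem.Set.nodup_ofList (cards.filter (fun c => c != 'J') ++ t)).filter _)
      ((PySem.Set.nodup_ofList cards).filter _)).mpr ?_
    intro k
    constructor
    · intro hk
      obtain ⟨hkD, hkP⟩ := List.mem_filter.mp hk
      have hnp : k ∉ poolL := by simpa using hkP
      obtain ⟨hkc, hkJ⟩ := hmemJ k hkD hnp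
      refine List.mem_filter.mpr ⟨by rw [PySem.Set.mem_ofList]; exact hkc, ?_⟩
      have hno : k ∉ ordL := by
        rw [ordL_eq]
        intro hmem
        rcases List.mem_cons.mp hmem with rfl | hmem2
        · exact hkJ rfl
        · exact hnp hmem2
      simpa using hno
    · intro hk
      obtain ⟨hkc, hko⟩ := List.mem_filter.mp hk
      have hko' : k ∉ ordL := by simpa using hko
      have hkJ : k ≠ 'J' := fun h => hko' (by rw [ordL_eq, h]; exact List.mem_cons_self ..)
      have hnp : k ∉ poolL := fun h => hko' (by rw [ordL_eq]; exact List.mem_cons_of_mem _ h)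
      refine List.mem_filter.mpr ⟨?_, by simpa using hnp⟩
      rw [PySem.Set.mem_ofList]
      refine List.mem_append.mpr (Or.inl (List.mem_filter.mpr ⟨?_, by simpa using hkJ⟩))
      rw [PySem.Set.mem_ofList] at hkc
      exact hkc

theorem type_ge_zero (x : List Char) : 0 ≤ determine_hand_type x := by
  rw [← type_eq_determine]
  unfold type_of_counts
  split_ifs <;> norm_num

theorem g_val (cards t : List Char) (ht : ∀ c ∈ t, c ∈ poolL)
    (hlen : cards.count 'J' = t.length) :
    type_of_counts (sortD ((sortA (vadd (base_of cards) t)).filter (fun v => decide (0 < v))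
        ++ others_of cards))
      = determine_hand_type (replace_cards cards t) := by
  have htsJ : ∀ c ∈ t, c ≠ 'J' := fun c hc => poolL_no_J c (ht c hc)
  rw [replace_cards_eq_substJ cards t htsJ hlen]
  rw [determine_perm (substJ_perm cards t hlen)]
  rw [← type_eq_determine]
  apply congrArg type_of_counts
  apply sortD_congr
  exact ((counter_values_perm cards t ht).trans
    ((((sortA_perm (vadd (base_of cards) t)).filter _).append_right _).symm)).symm

theorem best_eq (cards : List Char) :
    (if 0 < cards.count 'J' then
      (pyProduct "23456789TQKA".toList (cards.count 'J')).foldl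
        (fun best t => max best (determine_hand_type (replace_cards cards t))) 0
    else determine_hand_type cards) = best_type cards := by
  have hb : (base_of cards).length = 12 := by simp [base_of, poolL_length]
  have hchar : FrChar (base_of cards) (cards.count 'J')
      (frontierIter (cards.count 'J') [start_of cards]) := by
    have := iter_char (base_of cards) hb (cards.count 'J') 0 [start_of cards] (init_char cards)
    simpa using this
  unfold best_type
  by_cases hj : 0 < cards.count 'J'
  · rw [if_pos hj]
    apply foldl_max_congr
    · intro t hmem
      obtain ⟨hlen, hsub⟩ := (mem_pyProduct _ _ t).mp hmem
      exact ⟨sortA (vadd (base_of cards) t), (hchar _).mpr ⟨t, hlen, hsub, rfl⟩,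
        g_val cards t hsub hlen.symm⟩
    · intro st hmem
      obtain ⟨t, hlen, hsub, rfl⟩ := (hchar st).mp hmem
      exact ⟨t, (mem_pyProduct _ _ t).mpr ⟨hlen, hsub⟩, (g_val cards t hsub hlen.symm).symm⟩
  · rw [if_neg hj]
    have hj0 : cards.count 'J' = 0 := by omega
    rw [hj0]
    simp only [frontierIter, List.foldl_cons, List.foldl_nil]
    have hstart : start_of cards = sortA (vadd (base_of cards) []) := by
      rw [vadd_nil _ hb]; rfl
    rw [hstart]
    rw [show (type_of_counts (PySem.List.sorted ((sortA (vadd (base_of cards) [])).filter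
          (fun v => decide (0 < v)) ++ others_of cards) (fun v => v) true))
        = type_of_counts (sortD ((sortA (vadd (base_of cards) [])).filter
          (fun v => decide (0 < v)) ++ others_of cards)) from rfl]
    rw [g_val cards [] (by simp) (by simpa using hj0)]
    have hrepl : replace_cards cards [] = substJ cards [] :=
      replace_cards_eq_substJ cards [] (by simp) (by simpa using hj0)
    have hperm : (substJ cards []).Perm cards := by
      have h := substJ_perm cards [] (by simpa using hj0)
      have hfil : cards.filter (fun c => c != 'J') = cards :=
        List.filter_eq_self.mpr (fun a ha => by
          have : 'J' ∉ cards := List.count_eq_zero.mp hj0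
          simp only [bne_iff_ne, ne_eq]
          exact fun hac => this (hac ▸ ha))
      simpa [hfil] using h
    rw [hrepl, determine_perm hperm]
    exact (max_eq_right (type_ge_zero cards)).symm

theorem key_eq (h : String × Int) : hand_rank h = key_alt h := by
  simp only [hand_rank, key_alt, card_rank]
  rw [PySem.List.foldl_append_singleton_eq_map, List.nil_append]
  congr 1
  exact best_eq h.1.toList

-- ===== VERDICT (by name: the statement is the Claim_ definition above) =====
theorem sort_hands_spec : Claim_equal_sort_hands := by
  intro hands _ _
  unfold Spec_sort_hands sort_hands sort_hands_alt
  rw [funext key_eq]
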